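-- pv_equiv track=rewrite | github.com/hustfc/mininet-project | D2D+NC/NC/FileToM.py | StringToM
-- ===== SOURCE A (Python) =====
-- def StringToM(subString, size):
--     # string to matix
--     if len(subString) != size * size:
--         raise Exception('size error')
--     matrix = [(['0'] * size) for i in range(size)]
--     k = 0
--     for j in range(size):
--         for i in range(size):
--             matrix[i][j] = subString[k]
--             k += 1
--     return matrix
-- ===== SOURCE B (Python) =====
-- def StringToM(subString, size):
--     # string to matrix: chunk into size column-slices, then transpose
--     if len(subString) != size * size:
--         raise Exception('size error')
--     cols = [list(subString[j * size:(j + 1) * size]) for j in range(size)]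
--     return [list(row) for row in zip(*cols)]
-- ===== Notes on version B (the rewrite author's own statement) =====
-- stated objective: alternative
-- what changed: B reshapes by chunking the string into size consecutive column slices and transposing them with zip(*cols), instead of A's cell-by-cell writes into a preallocated matrix driven by an incremented counter.
import Mathlib
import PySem

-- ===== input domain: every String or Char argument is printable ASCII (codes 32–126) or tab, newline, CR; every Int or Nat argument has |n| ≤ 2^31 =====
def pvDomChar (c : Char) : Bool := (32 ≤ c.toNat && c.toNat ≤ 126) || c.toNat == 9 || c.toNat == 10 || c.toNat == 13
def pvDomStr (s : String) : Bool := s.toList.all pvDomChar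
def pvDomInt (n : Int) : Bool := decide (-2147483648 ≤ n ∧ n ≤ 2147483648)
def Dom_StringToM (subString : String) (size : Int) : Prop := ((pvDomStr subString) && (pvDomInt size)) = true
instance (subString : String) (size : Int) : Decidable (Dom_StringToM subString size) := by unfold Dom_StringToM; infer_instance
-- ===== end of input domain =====

-- B reshapes by chunk-and-transpose (column slices + zip) instead of A's counter-driven cell writes;
-- equivalence is proved on all inputs where A returns (Pre_ excludes exactly the raising inputs).

-- ===== PORT A =====
-- literal port of A: guard (raise -> excluded by Pre_, the port returns []), preallocated matrix of '0',
-- then nested loops writing matrix[i][j] = subString[k] with an incremented counter k.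
def StringToM (subString : String) (size : Int) : List (List String) :=
  if PySem.Str.len subString ≠ size * size then []  -- raise Exception('size error'); outside Pre_
  else
    let matrix : List (List String) :=
      (PySem.List.pyRange 0 size 1).map (fun _ => List.replicate size.toNat "0")
    let res : List (List String) × Int :=
      (PySem.List.pyRange 0 size 1).foldl
        (fun st j =>
          (PySem.List.pyRange 0 size 1).foldl
            (fun (st : List (List String) × Int) i =>
              (st.1.modify i.toNat
                 (fun row => row.set j.toNat
                    (((PySem.Str.pyGet? subString st.2).map (fun c => String.ofList [c])).getD "0")),
               st.2 + 1))
            st)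
        (matrix, 0)
    res.1

-- ===== PORT B =====
-- zip(*cols): truncating transpose, exactly Python's zip (number of rows = min column length)
def zipStarGo : Nat → List (List String) → List (List String)
  | 0, _ => []
  | m + 1, cols => cols.map (fun c => c.headD "") :: zipStarGo m (cols.map List.tail)

def zipStar (cols : List (List String)) : List (List String) :=
  zipStarGo (((cols.map List.length).min?).getD 0) cols

-- literal port of B: same guard, then size column slices, transposed
def StringToM_alt (subString : String) (size : Int) : List (List String) :=
  if PySem.Str.len subString ≠ size * size then []  -- raise Exception('size error'); outside Pre_
  else
    let cols : List (List String) :=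
      (PySem.List.pyRange 0 size 1).map
        (fun j => (PySem.Str.slice subString (some (j * size)) (some ((j + 1) * size))).toList.map
                    (fun c => String.ofList [c]))
    zipStar cols

-- ===== PRECONDITION & SPEC =====
-- Pre_ excludes exactly the inputs on which A raises Exception('size error'): len(subString) != size*size.
def Pre_StringToM (subString : String) (size : Int) : Prop :=
  PySem.Str.len subString = size * size
instance (subString : String) (size : Int) : Decidable (Pre_StringToM subString size) := by
  unfold Pre_StringToM; infer_instance

def pvWitness_StringToM : String × Int := ("abcd", 2)

def Spec_StringToM (subString : String) (size : Int) (out : List (List String)) : Prop :=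
  out = StringToM_alt subString size
instance (subString : String) (size : Int) (out : List (List String)) : Decidable (Spec_StringToM subString size out) := by
  unfold Spec_StringToM; infer_instance

-- ===== CLAIM (what is proved, stated in full; the proofs are below) =====
def Claim_equal_StringToM : Prop := ∀ (subString : String) (size : Int), Dom_StringToM subString size → Pre_StringToM subString size → Spec_StringToM subString size (StringToM subString size)

-- ===== LEMMAS AND PROOFS =====

-- the character written into cell k (a 1-char string; "0" is unreachable under Pre_)
def chFn (cs : List Char) (t : Nat) : String :=
  ((cs[t]?).map (fun c => String.ofList [c])).getD "0"

-- A's matrix after t counter steps: cell (i,j) is filled iff j*n+i < t (column-major fill order)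
def Mt (cs : List Char) (n t : Nat) : List (List String) :=
  (List.range n).map (fun i => (List.range n).map (fun j => if j * n + i < t then chFn cs (j * n + i) else "0"))

lemma map_range_modify {α : Type} (f : Nat → α) (n i : Nat) (g : α → α) (_hi : i < n) :
    ((List.range n).map f).modify i g
      = (List.range n).map (fun i' => if i' = i then g (f i') else f i') := by
  apply List.ext_getElem
  · simp [List.length_modify]
  · intro k h1 h2
    simp only [List.getElem_modify, List.getElem_map, List.getElem_range] at *
    by_cases hk : i = k
    · subst hk; simp
    · simp [hk, Ne.symm hk]

lemma map_range_set {α : Type} (f : Nat → α) (n j : Nat) (v : α) :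
    ((List.range n).map f).set j v
      = (List.range n).map (fun j' => if j' = j then v else f j') := by
  apply List.ext_getElem
  · simp
  · intro k h1 h2
    simp only [List.getElem_set, List.getElem_map, List.getElem_range] at *
    by_cases hk : j = k
    · subst hk; simp
    · simp [hk, Ne.symm hk]

lemma colmaj_eq_iff (n i i' j j' : Nat) (hi : i < n) (hi' : i' < n) :
    j' * n + i' = j * n + i ↔ i' = i ∧ j' = j := by
  constructor
  · intro h
    have hn : 0 < n := by omega
    have hmod : (j' * n + i') % n = (j * n + i) % n := by rw [h]
    rw [Nat.mul_comm j' n, Nat.mul_comm j n, Nat.mul_add_mod, Nat.mul_add_mod] at hmod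
    have hii : i' = i := by rwa [Nat.mod_eq_of_lt hi', Nat.mod_eq_of_lt hi] at hmod
    refine ⟨hii, ?_⟩
    subst hii
    have : j' * n = j * n := by omega
    exact Nat.eq_of_mul_eq_mul_right hn this
  · rintro ⟨rfl, rfl⟩; rfl

lemma stepCell (cs : List Char) (n t i j : Nat) (hi : i < n) (_hj : j < n) (ht : t = j * n + i) :
    (Mt cs n t).modify i (fun row => row.set j (chFn cs t)) = Mt cs n (t + 1) := by
  unfold Mt
  rw [map_range_modify _ n i _ hi]
  apply List.map_congr_left
  intro i' hi'
  have hi'n : i' < n := List.mem_range.mp hi'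
  by_cases hii : i' = i
  · rw [if_pos hii, map_range_set]
    apply List.map_congr_left
    intro j' hj'
    have hj'n : j' < n := List.mem_range.mp hj'
    by_cases hjj : j' = j
    · have heq : j' * n + i' = t := by rw [hjj, hii, ht]
      rw [if_pos hjj, if_pos (by omega), heq]
    · rw [if_neg hjj]
      have hne : ¬ (j' * n + i' = j * n + i) := by
        rw [colmaj_eq_iff n i i' j j' hi hi'n]; tauto
      by_cases hlt : j' * n + i' < t
      · rw [if_pos hlt, if_pos (by omega)]
      · rw [if_neg hlt, if_neg (by omega)]
  · rw [if_neg hii]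
    apply List.map_congr_left
    intro j' hj'
    have hj'n : j' < n := List.mem_range.mp hj'
    have hne : ¬ (j' * n + i' = j * n + i) := by
      rw [colmaj_eq_iff n i i' j j' hi hi'n]; tauto
    by_cases hlt : j' * n + i' < t
    · rw [if_pos hlt, if_pos (by omega)]
    · rw [if_neg hlt, if_neg (by omega)]

-- inner loop: for i in range(size), with column index jn fixed
lemma inner_fold (s : String) (n jn : Nat) (hj : jn < n) (m : Nat) (hm : m ≤ n) :
    (PySem.List.pyRange 0 (m : Int) 1).foldl
      (fun (st : List (List String) × Int) i =>
        (st.1.modify i.toNat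
           (fun row => row.set ((jn : Int)).toNat
              (((PySem.Str.pyGet? s st.2).map (fun c => String.ofList [c])).getD "0")),
         st.2 + 1))
      (Mt s.toList n (jn * n), ((jn * n : Nat) : Int))
    = (Mt s.toList n (jn * n + m), ((jn * n + m : Nat) : Int)) := by
  induction m with
  | zero => simp
  | succ m ih =>
    rw [show ((m + 1 : Nat) : Int) = (m : Int) + 1 by push_cast; ring,
        PySem.List.pyRange_one_succ_right (by positivity), List.foldl_append, ih (by omega)]
    simp only [List.foldl_cons, List.foldl_nil]
    have hget : PySem.Str.pyGet? s ((jn * n + m : Nat) : Int) = s.toList[jn * n + m]? :=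
      PySem.Str.pyGet?_natCast s _
    simp only [hget, Int.toNat_natCast]
    rw [show (((s.toList[jn * n + m]?).map (fun c => String.ofList [c])).getD "0") = chFn s.toList (jn * n + m) from rfl]
    rw [stepCell s.toList n (jn * n + m) m jn (by omega) hj rfl]
    rfl

-- outer loop: for j in range(size)
lemma outer_fold (s : String) (n : Nat) (m : Nat) (hm : m ≤ n) :
    (PySem.List.pyRange 0 (m : Int) 1).foldl
      (fun st j =>
        (PySem.List.pyRange 0 (n : Int) 1).foldl
          (fun (st : List (List String) × Int) i =>
            (st.1.modify i.toNat
               (fun row => row.set j.toNat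
                  (((PySem.Str.pyGet? s st.2).map (fun c => String.ofList [c])).getD "0")),
             st.2 + 1))
          st)
      (Mt s.toList n 0, (0 : Int))
    = (Mt s.toList n (m * n), ((m * n : Nat) : Int)) := by
  induction m with
  | zero => simp [PySem.List.pyRange_one]
  | succ m ih =>
    rw [show ((m + 1 : Nat) : Int) = (m : Int) + 1 by push_cast; ring,
        PySem.List.pyRange_one_succ_right (by positivity), List.foldl_append, ih (by omega)]
    simp only [List.foldl_cons, List.foldl_nil]
    have h := inner_fold s n m (by omega) n (le_refl n)
    rw [show m * n + n = (m + 1) * n by ring] at h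
    rw [show ((m * n : Nat) : Int) = ((m : Int)) * (n : Int) by push_cast; ring] at h ⊢
    exact h

lemma Mt_zero (cs : List Char) (n : Nat) :
    (List.range n).map (fun _ => List.replicate n ("0" : String)) = Mt cs n 0 := by
  unfold Mt
  apply List.map_congr_left
  intro i _
  simp [List.map_const']

lemma Mt_full (cs : List Char) (n : Nat) :
    Mt cs n (n * n)
      = (List.range n).map (fun i => (List.range n).map (fun j => chFn cs (j * n + i))) := by
  unfold Mt
  apply List.map_congr_left
  intro i hi
  apply List.map_congr_left
  intro j hj
  have hi' : i < n := List.mem_range.mp hi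
  have hj' : j < n := List.mem_range.mp hj
  have : j * n + i < n * n := by
    calc j * n + i < j * n + n := by omega
    _ = (j + 1) * n := by ring
    _ ≤ n * n := Nat.mul_le_mul_right n (by omega)
  rw [if_pos this]

-- zip(*cols) characterised: row i holds the i-th element of each column
lemma zipStarGo_eq (m : Nat) (cols : List (List String)) :
    zipStarGo m cols
      = (List.range m).map (fun i => cols.map (fun c => (c.drop i).headD "")) := by
  induction m generalizing cols with
  | zero => simp [zipStarGo]
  | succ m ih =>
    rw [zipStarGo, ih, List.range_succ_eq_map]
    simp only [List.map_cons, List.map_map, Function.comp_def, List.drop_tail]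
    simp [Nat.succ_eq_add_one]

lemma chars_slice_eq (l : List Char) (a b : Option Int) :
    PySem.Chars.slice l a b = PySem.List.slice l a b := rfl

lemma a_eq (s : String) (n : Nat) (hlen : s.toList.length = n * n) :
    StringToM s (n : Int)
      = (List.range n).map (fun i => (List.range n).map (fun j => chFn s.toList (j * n + i))) := by
  have hguard : ¬ (PySem.Str.len s ≠ (n : Int) * (n : Int)) := by
    rw [PySem.Str.len_eq, hlen]; push_cast; omega
  have hmat : (PySem.List.pyRange 0 (n : Int) 1).map
        (fun _ => List.replicate ((n : Int)).toNat ("0" : String)) = Mt s.toList n 0 := by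
    rw [PySem.List.pyRange_zero_nat, List.map_map]
    simp only [Function.comp_def, Int.toNat_natCast]
    exact Mt_zero s.toList n
  unfold StringToM
  rw [if_neg hguard]
  simp only []
  rw [hmat, outer_fold s n n (le_refl n), Mt_full]

def colB (s : String) (n j : Nat) : List String :=
  (PySem.Str.slice s (some ((j : Int) * (n : Int))) (some (((j : Int) + 1) * (n : Int)))).toList.map
    (fun c => String.ofList [c])

lemma alt_eq (s : String) (n : Nat) (hlen : s.toList.length = n * n) :
    StringToM_alt s (n : Int)
      = (List.range n).map (fun i => (List.range n).map (fun j => chFn s.toList (j * n + i))) := by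
  have hguard : ¬ (PySem.Str.len s ≠ (n : Int) * (n : Int)) := by
    rw [PySem.Str.len_eq, hlen]; push_cast; omega
  unfold StringToM_alt
  rw [if_neg hguard]
  simp only []
  rw [PySem.List.pyRange_zero_nat, List.map_map]
  have hfun : ((fun j : Int =>
        (PySem.Str.slice s (some (j * (n : Int))) (some ((j + 1) * (n : Int)))).toList.map
          (fun c => String.ofList [c])) ∘ (fun k : Nat => (k : Int)))
      = colB s n := by
    funext j; simp [colB]
  rw [hfun]
  have hcolB : ∀ j : Nat, j < n →
      colB s n j = ((s.toList.drop (j * n)).take n).map (fun c => String.ofList [c]) := by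
    intro j hj
    unfold colB
    rw [PySem.Str.toList_slice]
    rw [show ((j : Int) * (n : Int)) = ((j * n : Nat) : Int) by push_cast; ring]
    rw [show (((j : Int) + 1) * (n : Int)) = ((j * n : Nat) : Int) + ((n : Nat) : Int) by push_cast; ring]
    rw [chars_slice_eq, PySem.List.slice_natCast_add]
  have hle : ∀ j : Nat, j < n → j * n + n ≤ n * n := by
    intro j hj
    calc j * n + n = (j + 1) * n := by ring
    _ ≤ n * n := Nat.mul_le_mul_right n (by omega)
  have hlens : List.map List.length ((List.range n).map (colB s n)) = List.replicate n n := by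
    rw [List.map_map]
    have hrep : (List.range n).map (fun _ => n) = List.replicate n n := by simp [List.map_const']
    rw [← hrep]
    apply List.map_congr_left
    intro j hj
    have hj' : j < n := List.mem_range.mp hj
    have := hle j hj'
    simp [hcolB j hj', hlen]
    omega
  unfold zipStar
  rw [hlens]
  have hmin : ((List.replicate n n).min?).getD 0 = n := by
    rcases n with _ | k
    · simp
    · simp
  rw [hmin, zipStarGo_eq]
  apply List.map_congr_left
  intro i hi
  have hi' : i < n := List.mem_range.mp hi
  rw [List.map_map]
  apply List.map_congr_left
  intro j hj
  have hj' : j < n := List.mem_range.mp hj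
  simp only [Function.comp_def]
  rw [hcolB j hj']
  have hidx : j * n + i < n * n := by
    have := hle j hj'
    omega
  have hsome : s.toList[j * n + i]? = some (s.toList[j * n + i]'(by omega)) :=
    List.getElem?_eq_getElem (by omega)
  rw [List.headD_eq_head?_getD, List.head?_drop]
  rw [List.getElem?_map, List.getElem?_take_of_lt hi', List.getElem?_drop, hsome]
  unfold chFn
  rw [hsome]
  rfl

-- ===== VERDICT (by name: the statement is the Claim_ definition above) =====
theorem StringToM_spec : Claim_equal_StringToM := by
  intro s size _dom hpre
  unfold Spec_StringToM
  unfold Pre_StringToM at hpre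
  by_cases hsz : 0 ≤ size
  · obtain ⟨n, rfl⟩ : ∃ n : Nat, size = (n : Int) := ⟨size.toNat, (Int.toNat_of_nonneg hsz).symm⟩
    have hlen : s.toList.length = n * n := by
      rw [PySem.Str.len_eq] at hpre; exact_mod_cast hpre
    rw [a_eq s n hlen, alt_eq s n hlen]
  · have hrange : PySem.List.pyRange 0 size 1 = [] := by
      rw [PySem.List.pyRange_one]
      simp
      omega
    simp [StringToM, StringToM_alt, hrange, zipStar, zipStarGo]
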